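-- pv_equiv track=rewrite | github.com/Nuynaselr/PyProject | work/statistics/BuckFromDgx/GetStatistics.py | create_true_list_table
-- ===== SOURCE A (Python) =====
-- exclusive_tables = ['2019_10_09_18_50', '2019_10_10_15_57', '2019_10_16_20_51', '2019_11_01_12_00']
--
-- def create_true_list_table(list_tables):
--     true_list_tables = {}
--     for element in list_tables:
--         split_row = [str(x) for x in element.split('_')]
--         if split_row[1] in true_list_tables and element not in exclusive_tables:
--             true_list_tables.get(split_row[1]).append(element)
--         elif element not in exclusive_tables:
--             true_list_tables[split_row[1]] = [element]
--     return true_list_tables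
-- ===== SOURCE B (Python) =====
-- exclusive_tables = ['2019_10_09_18_50', '2019_10_10_15_57', '2019_10_16_20_51', '2019_11_01_12_00']
--
-- def create_true_list_table(list_tables):
--     kept = [e for e in list_tables if e not in exclusive_tables]
--     keys = dict.fromkeys(e.split('_')[1] for e in kept)
--     return {k: [e for e in kept if e.split('_')[1] == k] for k in keys}
-- ===== Notes on version B (the rewrite author's own statement) =====
-- stated objective: simpler
-- what changed: Replaces the single-pass mutable dict accumulation (membership test, in-place list append, conditional key insertion) by a declarative pipeline: filter out excluded names once, take the ordered deduplicated list of grouping keys (dict.fromkeys), and build each group with a per-key comprehension.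
import Mathlib
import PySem

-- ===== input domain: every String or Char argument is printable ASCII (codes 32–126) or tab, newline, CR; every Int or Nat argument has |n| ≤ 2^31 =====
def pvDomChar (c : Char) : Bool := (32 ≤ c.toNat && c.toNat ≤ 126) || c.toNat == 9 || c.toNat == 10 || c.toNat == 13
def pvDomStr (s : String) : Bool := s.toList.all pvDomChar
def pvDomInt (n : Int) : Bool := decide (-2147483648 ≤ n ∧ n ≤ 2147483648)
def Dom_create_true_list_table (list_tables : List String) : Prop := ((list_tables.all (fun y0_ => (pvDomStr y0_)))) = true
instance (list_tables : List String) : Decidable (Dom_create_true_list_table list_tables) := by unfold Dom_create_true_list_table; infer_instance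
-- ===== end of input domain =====

-- ===== PORT A =====
-- B restates A's grouping as filter + ordered key dedup + per-key comprehension (simpler, declarative).
-- Both ports are about the RETURN value; A mutates only its local dict.
def exclusive_tables : List String :=
  ["2019_10_09_18_50", "2019_10_10_15_57", "2019_10_16_20_51", "2019_11_01_12_00"]

-- element.split('_')[1]  (the [str(x) for x in …] in A is the identity on strings).
-- sep "_" is non-empty so split? is always `some`; the `[1]` IndexError (no '_' in the
-- element) is excluded by Pre_, so the `.getD ""` default is never reached there.
def pySplitKey (element : String) : String :=
  (PySem.List.pyGet? ((PySem.Str.split? element "_").getD []) 1).getD ""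

def create_true_list_table (list_tables : List String) : List (String × List String) :=
  (list_tables.foldl (fun true_list_tables element =>
      let k := pySplitKey element
      if ((true_list_tables.get? k).isSome && !(exclusive_tables.contains element)) then
        PySem.Dict.modify true_list_tables k [] (fun l => l ++ [element])
      else if !(exclusive_tables.contains element) then
        true_list_tables.insert k [element]
      else
        true_list_tables)
    PySem.Dict.empty).items

-- ===== PORT B =====
def create_true_list_table_alt (list_tables : List String) : List (String × List String) :=
  let kept := list_tables.filter (fun e => !(exclusive_tables.contains e))
  let keys := PySem.List.dedup (kept.map pySplitKey)
  keys.map (fun k => (k, kept.filter (fun e => pySplitKey e == k)))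

-- ===== PRECONDITION & SPEC =====
-- Pre_ excludes exactly the inputs where A raises IndexError: an element without '_'
-- has split('_') of length 1 and split_row[1] fails.
def Pre_create_true_list_table (list_tables : List String) : Prop :=
  ∀ s ∈ list_tables, '_' ∈ s.toList
instance (list_tables : List String) : Decidable (Pre_create_true_list_table list_tables) := by
  unfold Pre_create_true_list_table; infer_instance

def pvWitness_create_true_list_table : List String :=
  ["2019_10_09_18_50", "foo_bar", "baz_bar", "foo_qux"]

def Spec_create_true_list_table (list_tables : List String) (out : List (String × List String)) : Prop := out = create_true_list_table_alt list_tables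
instance (list_tables : List String) (out : List (String × List String)) : Decidable (Spec_create_true_list_table list_tables out) := by unfold Spec_create_true_list_table; infer_instance

-- ===== CLAIM (what is proved, stated in full; the proofs are below) =====
def Claim_equal_create_true_list_table : Prop := ∀ (list_tables : List String), Dom_create_true_list_table list_tables → Pre_create_true_list_table list_tables → Spec_create_true_list_table list_tables (create_true_list_table list_tables)

-- ===== LEMMAS AND PROOFS =====

-- Abbreviations for the proof (the two loop bodies, named).
def pvKeep (e : String) : Bool := !(exclusive_tables.contains e)

def pvStep (d : PySem.Dict String (List String)) (element : String) :
    PySem.Dict String (List String) :=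
  let k := pySplitKey element
  if ((d.get? k).isSome && !(exclusive_tables.contains element)) then
    PySem.Dict.modify d k [] (fun l => l ++ [element])
  else if !(exclusive_tables.contains element) then
    d.insert k [element]
  else
    d

-- B's result as a function of the filtered list.
def pvGroups (kept : List String) : List (String × List String) :=
  (PySem.List.dedup (kept.map pySplitKey)).map
    (fun k => (k, kept.filter (fun e => pySplitKey e == k)))

lemma dedup_append_singleton {a : String} {M : List String} :
    PySem.List.dedup (M ++ [a]) = if a ∈ M then PySem.List.dedup M else PySem.List.dedup M ++ [a] := by
  simp only [PySem.List.dedup, PySem.Set.ofList, List.foldl_append, List.foldl_cons,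
    List.foldl_nil, PySem.Set.add]
  by_cases h : a ∈ M
  · simp [pysem, h]
    exact (PySem.Set.mem_ofList M a).mpr h
  · simp [pysem, h]
    exact fun hc => h ((PySem.Set.mem_ofList M a).mp hc)

lemma find_entry (g : String → List String) (keys : List String) (k : String) :
    (keys.map (fun k' => (k', g k'))).find? (fun p => p.1 == k)
      = if k ∈ keys then some (k, g k) else none := by
  induction keys with
  | nil => simp
  | cons x rest ih =>
    by_cases hx : x = k
    · subst hx; simp
    · simp only [List.map_cons, List.find?]
      have : ((x, g x).1 == k) = false := by simpa using hx
      have hx' : ¬ k = x := fun h => hx h.symm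
      simp [this, ih, hx']

lemma get_groups (L : List String) (k : String) :
    (PySem.Dict.mk (pvGroups L)).get? k
      = if k ∈ L.map pySplitKey
        then some (L.filter (fun e => pySplitKey e == k)) else none := by
  show ((pvGroups L).find? (fun p => p.1 == k)).map (fun x => x.2) = _
  unfold pvGroups
  rw [find_entry]
  by_cases h : k ∈ L.map pySplitKey
  · simp [h]
  · simp [h]

lemma groups_append (L : List String) (x : String) :
    pvGroups (L ++ [x]) =
      (if pySplitKey x ∈ L.map pySplitKey
       then PySem.List.dedup (L.map pySplitKey)
       else PySem.List.dedup (L.map pySplitKey) ++ [pySplitKey x]).map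
        (fun k' => (k', L.filter (fun e => pySplitKey e == k')
                          ++ if pySplitKey x == k' then [x] else [])) := by
  unfold pvGroups
  rw [List.map_append, List.map_singleton, dedup_append_singleton]
  simp only [List.filter_append, List.filter_cons, List.filter_nil]

lemma step_keep (L : List String) (x : String) (hnc : exclusive_tables.contains x = false) :
    pvStep (PySem.Dict.mk (pvGroups L)) x = PySem.Dict.mk (pvGroups (L ++ [x])) := by
  rw [groups_append]
  by_cases hm : pySplitKey x ∈ L.map pySplitKey
  · have hsome : (PySem.Dict.mk (pvGroups L)).get? (pySplitKey x)
        = some (L.filter (fun e => pySplitKey e == pySplitKey x)) := by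
      rw [get_groups]; simp [hm]
    have hcont : (PySem.Dict.mk (pvGroups L)).contains (pySplitKey x) = true := by
      unfold PySem.Dict.contains pvGroups
      refine List.any_eq_true.mpr ?_
      exact ⟨(pySplitKey x, L.filter (fun e => pySplitKey e == pySplitKey x)),
        List.mem_map.mpr ⟨pySplitKey x, (PySem.List.mem_dedup _ _).mpr hm, rfl⟩, by simp⟩
    unfold pvStep
    simp only [hsome, Option.isSome_some, hnc, Bool.not_false, Bool.and_true, if_true,
      PySem.Dict.modify, PySem.Dict.getD, Option.getD_some, PySem.Dict.insert,
      hcont, hm]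
    congr 1
    unfold pvGroups
    rw [List.map_map, List.map_congr_left]
    intro k' _
    by_cases hkk : k' = pySplitKey x
    · subst hkk; simp
    · have h1 : (k' == pySplitKey x) = false := by simpa using hkk
      have h2 : (pySplitKey x == k') = false := by simpa using (Ne.symm hkk)
      simp [h2, hkk]
  · have hnone : (PySem.Dict.mk (pvGroups L)).get? (pySplitKey x) = none := by
      rw [get_groups]; simp [hm]
    have hfind : (pvGroups L).find? (fun p => p.1 == pySplitKey x) = none := by
      have h := hnone
      unfold PySem.Dict.get? at h
      simpa using h
    have hcont : (PySem.Dict.mk (pvGroups L)).contains (pySplitKey x) = false := by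
      unfold PySem.Dict.contains
      refine List.any_eq_false.mpr ?_
      intro p hp
      simpa using List.find?_eq_none.mp hfind p hp
    unfold pvStep
    simp only [hnone, Option.isSome_none, Bool.false_and, if_false, hnc, Bool.not_false,
      if_true, PySem.Dict.insert, hcont, Bool.false_eq_true, hm]
    congr 1
    have hfilt : L.filter (fun e => pySplitKey e == pySplitKey x) = [] := by
      refine List.filter_eq_nil_iff.mpr ?_
      intro e he hbe
      exact hm (List.mem_map.mpr ⟨e, he, eq_of_beq hbe⟩)
    unfold pvGroups
    rw [List.map_append, List.map_singleton]
    congr 1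
    · apply List.map_congr_left
      intro k' hk'
      have : pySplitKey x ≠ k' := fun h => hm (h ▸ (PySem.List.mem_dedup _ _).mp hk')
      have h2 : (pySplitKey x == k') = false := by simpa using this
      simp [h2]
    · simp [hfilt]

lemma main_invariant (xs : List String) :
    xs.foldl pvStep PySem.Dict.empty = PySem.Dict.mk (pvGroups (xs.filter pvKeep)) := by
  induction xs using List.reverseRecOn with
  | nil => rfl
  | append_singleton xs x ih =>
    rw [List.foldl_append, List.foldl_cons, List.foldl_nil, ih, List.filter_append]
    by_cases hk : pvKeep x = true
    · rw [show List.filter pvKeep [x] = [x] by simp [hk]]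
      have hnc : exclusive_tables.contains x = false := by
        unfold pvKeep at hk; simpa using hk
      exact step_keep _ x hnc
    · have hmem : x ∈ exclusive_tables := by
        unfold pvKeep at hk; simpa using hk
      rw [show List.filter pvKeep [x] = [] by simp [List.filter, pvKeep, hmem], List.append_nil]
      simp [pvStep, hmem]

theorem create_true_list_table_spec : Claim_equal_create_true_list_table := by
  intro list_tables _ _
  unfold Spec_create_true_list_table create_true_list_table create_true_list_table_alt
  have h := main_invariant list_tables
  unfold pvStep pvKeep at h
  rw [h]
  rfl
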